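-- pv_equiv track=rewrite | github.com/christianzmwang/testCrawler | tradcrawler.py | _detect_base_language_from_domain
-- ===== SOURCE A (Python) =====
-- def _detect_base_language_from_domain(domain: str) -> str:
--     """Detect base language from domain extension."""
--     # Map domain extensions to language codes
--     domain_lang_map = {
--         '.no': 'no',      # Norwegian
--         '.se': 'sv',      # Swedish
--         '.dk': 'da',      # Danish
--         '.fi': 'fi',      # Finnish
--         '.de': 'de',      # German
--         '.fr': 'fr',      # French
--         '.es': 'es',      # Spanish
--         '.it': 'it',      # Italian
--         '.pt': 'pt',      # Portuguese
--         '.nl': 'nl',      # Dutch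
--         '.be': 'nl',      # Belgian (Dutch/French, default to Dutch)
--         '.jp': 'ja',      # Japanese
--         '.cn': 'zh',      # Chinese
--         '.kr': 'ko',      # Korean
--         '.ru': 'ru',      # Russian
--         '.com': 'en',     # English (international)
--         '.org': 'en',     # English
--         '.net': 'en',     # English
--         '.edu': 'en',     # English
--         '.gov': 'en',     # English
--     }
--
--     domain_lower = domain.lower()
--     for ext, lang in domain_lang_map.items():
--         if domain_lower.endswith(ext):
--             return lang
--
--     # Default to English if unknown
--     return 'en'
-- ===== SOURCE B (Python) =====
-- def _tld_language(tld: str) -> str: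
--     """Language for a bare TLD: a few remapped cases, identity TLDs, else English."""
--     if tld == 'se':
--         return 'sv'
--     if tld == 'dk':
--         return 'da'
--     if tld == 'be':
--         return 'nl'
--     if tld == 'jp':
--         return 'ja'
--     if tld == 'cn':
--         return 'zh'
--     if tld == 'kr':
--         return 'ko'
--     if tld in ('no', 'fi', 'de', 'fr', 'es', 'it', 'pt', 'nl', 'ru'):
--         return tld
--     # com/org/net/edu/gov and anything unknown
--     return 'en'
--
--
-- def _detect_base_language_from_domain(domain: str) -> str:
--     """Detect base language from domain extension (classify the final dot-segment)."""
--     _, sep, tld = domain.lower().rpartition('.')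
--     return _tld_language(tld) if sep else 'en'
-- ===== Notes on version B (the rewrite author's own statement) =====
-- stated objective: simpler
-- what changed: Drops A's 20-entry suffix map and endswith scan entirely: B isolates the TLD once with rpartition and classifies it by a small conditional (six remapped TLDs, an identity group whose language code equals the TLD itself, default English), so there is no table and no scan.
import Mathlib
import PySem

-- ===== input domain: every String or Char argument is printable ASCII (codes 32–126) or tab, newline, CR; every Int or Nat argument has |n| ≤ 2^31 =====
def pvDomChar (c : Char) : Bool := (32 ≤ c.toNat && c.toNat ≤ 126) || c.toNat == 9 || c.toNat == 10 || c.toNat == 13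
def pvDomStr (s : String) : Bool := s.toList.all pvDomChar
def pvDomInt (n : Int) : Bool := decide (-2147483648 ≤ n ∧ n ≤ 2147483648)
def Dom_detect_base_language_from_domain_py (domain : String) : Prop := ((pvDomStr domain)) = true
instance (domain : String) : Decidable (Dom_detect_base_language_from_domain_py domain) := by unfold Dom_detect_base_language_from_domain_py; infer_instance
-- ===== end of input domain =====

-- B drops A's suffix map and endswith scan: it isolates the TLD once (rpartition from the
-- right) and classifies it with a small conditional; return value only, nothing is mutated ('simpler').

-- ===== PORT A =====
-- the literal domain_lang_map, in A's insertion order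
def pvLangMapA : List (String × String) :=
  [(".no","no"),(".se","sv"),(".dk","da"),(".fi","fi"),(".de","de"),
   (".fr","fr"),(".es","es"),(".it","it"),(".pt","pt"),(".nl","nl"),
   (".be","nl"),(".jp","ja"),(".cn","zh"),(".kr","ko"),(".ru","ru"),
   (".com","en"),(".org","en"),(".net","en"),(".edu","en"),(".gov","en")]

-- the for-loop over the map items: first endswith match wins, else fall through to "en"
def pvScanA (dl : String) : List (String × String) → String
  | [] => "en"
  | (ext, lang) :: rest => if PySem.Str.endswith dl ext then lang else pvScanA dl rest

def detect_base_language_from_domain_py (domain : String) : String :=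
  pvScanA (PySem.Str.lower domain) pvLangMapA

-- ===== PORT B =====
-- _tld_language: the chained-conditional classifier of Source B, branch for branch
def pvTldLanguage (tld : String) : String :=
  if tld = "se" then "sv"
  else if tld = "dk" then "da"
  else if tld = "be" then "nl"
  else if tld = "jp" then "ja"
  else if tld = "cn" then "zh"
  else if tld = "kr" then "ko"
  else if tld ∈ ["no", "fi", "de", "fr", "es", "it", "pt", "nl", "ru"] then tld
  else "en"

-- dl.rpartition('.') ported by hand (PySem has no rpartition): scan the REVERSED character
-- list; 'none' = no '.' in dl (empty separator), 'some rt' = the characters after the last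
-- '.', still in reversed order. Exact for every string.
def pvRPartTld : List Char → Option (List Char)
  | [] => none
  | c :: rest => if c = '.' then some [] else (pvRPartTld rest).map (fun t => c :: t)

def detect_base_language_from_domain_py_alt (domain : String) : String :=
  match pvRPartTld (PySem.Str.lower domain).toList.reverse with
  | none => "en"
  | some rt => pvTldLanguage (String.ofList rt.reverse)

-- ===== PRECONDITION & SPEC =====
def Spec_detect_base_language_from_domain_py (domain : String) (out : String) : Prop := out = detect_base_language_from_domain_py_alt domain
instance (domain : String) (out : String) : Decidable (Spec_detect_base_language_from_domain_py domain out) := by unfold Spec_detect_base_language_from_domain_py; infer_instance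

-- ===== CLAIM (what is proved, stated in full; the proofs are below) =====
def Claim_equal_detect_base_language_from_domain_py : Prop := ∀ (domain : String), Dom_detect_base_language_from_domain_py domain → Spec_detect_base_language_from_domain_py domain (detect_base_language_from_domain_py domain)

-- ===== LEMMAS AND PROOFS =====

-- the last dot-segment of a character list (proof-side abbreviation)
def pvLastSeg (cs : List Char) : List Char :=
  (cs.reverse.takeWhile (fun c => decide (c ≠ '.'))).reverse

-- splitting off the last dot-segment characterises a reversed "dot ++ dot-free block" prefix
theorem pv_seg (rl u : List Char) (hu : '.' ∉ u) :
    (u ++ ['.']) <+: rl ↔ ('.' ∈ rl ∧ rl.takeWhile (fun c => decide (c ≠ '.')) = u) := by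
  induction rl generalizing u with
  | nil => simp
  | cons c rl ih =>
    by_cases hc : c = '.'
    · subst hc
      constructor
      · intro hpre
        cases u with
        | nil => simp
        | cons a u' =>
          rw [List.cons_append, List.cons_prefix_cons] at hpre
          exact absurd hpre.1.symm (by simpa using (by simp at hu; exact hu.1))
      · rintro ⟨-, ht⟩
        rw [List.takeWhile_cons] at ht
        simp at ht
        subst ht
        exact ⟨rl, rfl⟩
    · constructor
      · intro hpre
        cases u with
        | nil =>
          rw [List.nil_append, List.cons_prefix_cons] at hpre
          exact absurd hpre.1.symm hc
        | cons a u' =>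
          rw [List.cons_append, List.cons_prefix_cons] at hpre
          obtain ⟨rfl, hpre'⟩ := hpre
          have hu' : '.' ∉ u' := (by simp at hu; exact hu.2)
          obtain ⟨hm, ht⟩ := (ih u' hu').mp hpre'
          refine ⟨List.mem_cons_of_mem _ hm, ?_⟩
          rw [List.takeWhile_cons]
          simp only [decide_eq_true_eq]
          rw [if_pos hc, ht]
      · rintro ⟨hm, ht⟩
        have hm' : '.' ∈ rl := by
          rcases List.mem_cons.mp hm with h | h
          · exact absurd h.symm hc
          · exact h
        rw [List.takeWhile_cons] at ht
        simp only [decide_eq_true_eq] at ht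
        rw [if_pos hc] at ht
        cases u with
        | nil => exact absurd ht (by simp)
        | cons a u' =>
          obtain ⟨rfl, ht'⟩ : c = a ∧ rl.takeWhile (fun c => decide (c ≠ '.')) = u' := by
            constructor
            · exact (List.cons.injEq _ _ _ _ ▸ ht).1
            · exact (List.cons.injEq _ _ _ _ ▸ ht).2
          have hu' : '.' ∉ u' := (by simp at hu; exact hu.2)
          have := (ih u' hu').mpr ⟨hm', ht'⟩
          rw [List.cons_append]
          exact List.cons_prefix_cons.mpr ⟨rfl, this⟩

-- A's endswith test for a '.'-led, dot-free extension, as a condition on the last segment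
theorem pv_ends (cs t : List Char) (ht : '.' ∉ t) :
    PySem.Chars.endswith cs ('.' :: t) =
      (decide ('.' ∈ cs) && (cs.reverse.takeWhile (fun c => decide (c ≠ '.')) == t.reverse)) := by
  rw [Bool.eq_iff_iff]
  simp only [PySem.Chars.endswith_iff, Bool.and_eq_true, decide_eq_true_eq, beq_iff_eq]
  rw [← List.reverse_prefix, List.reverse_cons]
  rw [pv_seg _ _ (by simpa using ht)]
  simp

theorem pv_ofList_beq (l : List Char) (s : String) :
    (String.ofList l == s) = (l == s.toList) := by
  rw [Bool.eq_iff_iff]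
  simp only [beq_iff_eq]
  constructor
  · intro h; have := congrArg String.toList h; simpa using this
  · intro h; rw [h]; exact String.ofList_toList

theorem pv_revbeq (l m : List Char) : (l.reverse == m) = (l == m.reverse) := by
  rw [Bool.eq_iff_iff]
  simp [List.reverse_eq_iff]

-- B's hand-ported rpartition, characterised by membership and takeWhile
theorem pv_rpart (rl : List Char) :
    pvRPartTld rl = if '.' ∈ rl then some (rl.takeWhile (fun c => decide (c ≠ '.'))) else none := by
  induction rl with
  | nil => simp [pvRPartTld]
  | cons c rl ih =>
    by_cases hc : c = '.'
    · subst hc; simp [pvRPartTld]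
    · by_cases hm : '.' ∈ rl
      · simp [pvRPartTld, hc, hm, ih, Ne.symm hc]
      · have : ¬ '.' ∈ (c :: rl) := by simp [Ne.symm hc, hm]
        simp [pvRPartTld, hc, hm, ih, this]

-- the bare (dot-free) key list A's literal map is an image of
def pvBareL : List (List Char × String) :=
  [(['n','o'],"no"),(['s','e'],"sv"),(['d','k'],"da"),(['f','i'],"fi"),(['d','e'],"de"),
   (['f','r'],"fr"),(['e','s'],"es"),(['i','t'],"it"),(['p','t'],"pt"),(['n','l'],"nl"),
   (['b','e'],"nl"),(['j','p'],"ja"),(['c','n'],"zh"),(['k','r'],"ko"),(['r','u'],"ru"),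
   (['c','o','m'],"en"),(['o','r','g'],"en"),(['n','e','t'],"en"),(['e','d','u'],"en"),(['g','o','v'],"en")]

theorem pv_gen (dl : String) : ∀ (L : List (List Char × String)), (∀ p ∈ L, '.' ∉ p.1) →
    pvScanA dl (L.map (fun p => (String.ofList ('.' :: p.1), p.2))) =
      (if decide ('.' ∈ dl.toList) = false then "en"
       else ((L.map (fun p => (String.ofList p.1, p.2))).lookup
               (String.ofList (pvLastSeg dl.toList))).getD "en") := by
  intro L
  induction L with
  | nil =>
    intro _
    by_cases hdot : '.' ∈ dl.toList <;> simp [pvScanA, hdot]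
  | cons p L ih =>
    intro hL
    obtain ⟨t, lang⟩ := p
    have ht : '.' ∉ t := hL (t, lang) (by simp)
    have hL' : ∀ p ∈ L, '.' ∉ p.1 := fun p hp => hL p (List.mem_cons_of_mem _ hp)
    simp only [List.map_cons, pvScanA, PySem.Str.endswith_eq, String.toList_ofList]
    rw [pv_ends _ _ ht]
    by_cases hdot : '.' ∈ dl.toList
    · simp only [hdot, decide_true, Bool.true_and]
      by_cases hseg : dl.toList.reverse.takeWhile (fun c => !decide (c = '.')) = t.reverse
      · simp [hseg, List.lookup, pvLastSeg]
      · have hb : (dl.toList.reverse.takeWhile (fun c => !decide (c = '.')) == t.reverse) = false :=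
          beq_eq_false_iff_ne.mpr hseg
        simp [hb, hdot, List.lookup, pvLastSeg, pv_ofList_beq, pv_revbeq, ih hL']
    · simp [hdot, ih hL']

-- the bare-key lookup agrees with B's chained classifier on EVERY string
theorem pv_lookup (t : String) :
    ((pvBareL.map (fun p => (String.ofList p.1, p.2))).lookup t).getD "en" = pvTldLanguage t := by
  have h : pvBareL.map (fun p => (String.ofList p.1, p.2)) =
      [("no","no"),("se","sv"),("dk","da"),("fi","fi"),("de","de"),
       ("fr","fr"),("es","es"),("it","it"),("pt","pt"),("nl","nl"),
       ("be","nl"),("jp","ja"),("cn","zh"),("kr","ko"),("ru","ru"),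
       ("com","en"),("org","en"),("net","en"),("edu","en"),("gov","en")] := by decide
  rw [h]
  simp only [List.lookup, pvTldLanguage, List.mem_cons, List.not_mem_nil]
  split_ifs with h1 h2 h3 h4 h5 h6 h7
  · subst h1; rfl
  · subst h2; rfl
  · subst h3; rfl
  · subst h4; rfl
  · subst h5; rfl
  · subst h6; rfl
  · rcases h7 with rfl | rfl | rfl | rfl | rfl | rfl | rfl | rfl | rfl | h0 <;> first | rfl | exact h0.elim
  · push Not at h7
    obtain ⟨n1, n2, n3, n4, n5, n6, n7, n8, n9, -⟩ := h7
    simp only [beq_eq_false_iff_ne.mpr n1, beq_eq_false_iff_ne.mpr h1,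
      beq_eq_false_iff_ne.mpr h2, beq_eq_false_iff_ne.mpr n2, beq_eq_false_iff_ne.mpr n3,
      beq_eq_false_iff_ne.mpr n4, beq_eq_false_iff_ne.mpr n5, beq_eq_false_iff_ne.mpr n6,
      beq_eq_false_iff_ne.mpr n7, beq_eq_false_iff_ne.mpr n8, beq_eq_false_iff_ne.mpr h3,
      beq_eq_false_iff_ne.mpr h4, beq_eq_false_iff_ne.mpr h5, beq_eq_false_iff_ne.mpr h6,
      beq_eq_false_iff_ne.mpr n9]
    cases t == "com" <;> cases t == "org" <;> cases t == "net" <;>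
      cases t == "edu" <;> cases t == "gov" <;> rfl

-- ===== VERDICT (by name: the statement is the Claim_ definition above) =====
theorem detect_base_language_from_domain_py_spec : Claim_equal_detect_base_language_from_domain_py := by
  intro domain _
  unfold Spec_detect_base_language_from_domain_py detect_base_language_from_domain_py detect_base_language_from_domain_py_alt
  set dl := PySem.Str.lower domain with hdl
  rw [show pvLangMapA = pvBareL.map (fun p => (String.ofList ('.' :: p.1), p.2)) from by decide,
      pv_gen dl pvBareL (by decide), pv_lookup, pv_rpart]
  by_cases hdot : '.' ∈ dl.toList.reverse
  · have hdot' : '.' ∈ dl.toList := by simpa using hdot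
    simp [hdot, hdot', pvLastSeg]
  · have hdot' : ¬ '.' ∈ dl.toList := by simpa using hdot
    simp [hdot, hdot']
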